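-- pv_equiv track=rewrite | github.com/judoshka/NKR | AppendixD.py | graph_to_string
-- ===== SOURCE A (Python) =====
-- def graph_to_string(graph, node):
--     child_cnt = len(graph.get(node, []))
--     if not child_cnt:
--         return "0"
--     else:
--         s = []
--         for child in graph.get(node, []):
--             s.append(graph_to_string(graph, child))
--         return str(child_cnt) + "".join(sorted(s))
-- ===== SOURCE B (Python) =====
-- def graph_to_string(graph, node):
--     # Bottom-up rounds over a memo dict: each round resolves every key whose
--     # children are all resolved; stop as soon as a round makes no progress.
--     # Each key's encoding is computed exactly once.
--     enc = {}
--     for _ in range(len(graph)):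
--         progressed = False
--         for k, children in graph.items():
--             if k in enc:
--                 continue
--             if all(c in enc or c not in graph for c in children):
--                 if not children:
--                     enc[k] = "0"
--                 else:
--                     enc[k] = str(len(children)) + "".join(
--                         sorted(enc.get(c, "0") for c in children))
--                 progressed = True
--         if not progressed:
--             break
--     return enc[node] if node in graph else "0"
-- ===== Notes on version B (the rewrite author's own statement) =====
-- stated objective: alternative
-- what changed: A's top-down recursion (which re-expands shared subtrees exponentially) is replaced by bottom-up rounds over a memo dict: each round resolves every key whose children are all resolved, stopping when a round makes no progress, so each key's encoding is computed exactly once.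
import Mathlib
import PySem

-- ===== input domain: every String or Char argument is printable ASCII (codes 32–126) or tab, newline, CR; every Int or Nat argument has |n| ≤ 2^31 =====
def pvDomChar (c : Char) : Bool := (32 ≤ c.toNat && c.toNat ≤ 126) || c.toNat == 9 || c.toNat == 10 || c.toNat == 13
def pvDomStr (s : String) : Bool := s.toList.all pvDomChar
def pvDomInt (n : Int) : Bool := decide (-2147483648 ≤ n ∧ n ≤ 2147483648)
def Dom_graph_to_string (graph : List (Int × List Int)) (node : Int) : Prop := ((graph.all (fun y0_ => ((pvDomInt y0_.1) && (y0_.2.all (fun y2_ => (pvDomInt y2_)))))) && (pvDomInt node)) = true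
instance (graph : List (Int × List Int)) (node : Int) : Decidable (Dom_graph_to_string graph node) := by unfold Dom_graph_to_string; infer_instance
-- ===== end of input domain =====

-- B replaces A's top-down recursion by bottom-up rounds over a memo dict (each key's
-- encoding computed once); objective: alternative (memoization removes A's repeated
-- re-computation of shared subtrees; A is linear on plain trees where B does n rounds).

-- ===== PORT A =====
-- graph.get(k, [])  (dict passed as an association list; lookup = first match)
def pyDictGetD (g : List (Int × List Int)) (k : Int) : List Int :=
  match g.find? (fun p => p.1 == k) with
  | some p => p.2
  | none => []

-- A's recursion, totalised with fuel; fuel graph.length + 1 bounds the recursion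
-- depth on every input admitted by Pre_ (proved below), so the "0 fuel" arm is dead there.
def gtsA (g : List (Int × List Int)) : Nat → Int → String
  | 0, _ => ""
  | fuel+1, node =>
    if (pyDictGetD g node).length = 0 then "0"
    else
      PySem.Int.toStr ((pyDictGetD g node).length : Int) ++
        PySem.Str.join "" (PySem.List.sorted
          ((pyDictGetD g node).foldl (fun s c => s ++ [gtsA g fuel c]) []) (fun x => x) false)

def graph_to_string (graph : List (Int × List Int)) (node : Int) : String :=
  gtsA graph (graph.length + 1) node

-- ===== PORT B =====
-- c in graph  (key membership)
def isKeyB (g : List (Int × List Int)) (c : Int) : Bool := g.any (fun q => q.1 == c)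

-- "0" for a leaf, else str(len(children)) + "".join(sorted(enc.get(c, "0") for c in children))
def encValB (enc : PySem.Dict Int String) (children : List Int) : String :=
  if children.isEmpty then "0"
  else
    PySem.Int.toStr (children.length : Int) ++
      PySem.Str.join "" (PySem.List.sorted
        (children.map (fun c => enc.getD c "0")) (fun x => x) false)

-- one key k = p.1 with children p.2: resolve it if unresolved and all key-children
-- resolved; the Bool component is this round's `progressed` flag
def stepB (g : List (Int × List Int)) (s : PySem.Dict Int String × Bool)
    (p : Int × List Int) : PySem.Dict Int String × Bool :=
  if s.1.contains p.1 then s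
  else if p.2.all (fun c => s.1.contains c || !isKeyB g c) then
    (s.1.insert p.1 (encValB s.1 p.2), true)
  else s

-- for k, children in graph.items(): ...   (starts with progressed = False)
def roundB (g : List (Int × List Int)) (enc : PySem.Dict Int String) :
    PySem.Dict Int String × Bool :=
  g.foldl (stepB g) (enc, false)

-- one iteration of the outer `for _ in range(len(graph))` loop; the Bool component
-- is the `break` state: once a round made no progress, later iterations do nothing
def outerB (g : List (Int × List Int)) (s : PySem.Dict Int String × Bool) :
    PySem.Dict Int String × Bool :=
  if s.2 then s
  else
    ((roundB g s.1).1, !(roundB g s.1).2)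

def graph_to_string_alt (graph : List (Int × List Int)) (node : Int) : String :=
  let enc := ((List.range graph.length).foldl (fun s _ => outerB graph s)
    (PySem.Dict.empty, false)).1
  -- enc[node]: under Pre_ node is always resolved, so .getD "0" is the total form
  -- (Python B raises KeyError only on inputs excluded by Pre_)
  if isKeyB graph node then (enc.get? node).getD "0" else "0"

-- ===== PRECONDITION & SPEC =====
-- bounded reachability: reachF g n k = nodes reachable from k in 1..n+1 child steps
def kidsF (g : List (Int × List Int)) (k : Int) : Finset Int := (pyDictGetD g k).toFinset

def reachF (g : List (Int × List Int)) : Nat → Int → Finset Int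
  | 0, k => kidsF g k
  | n+1, k => reachF g n k ∪ (reachF g n k).biUnion (kidsF g)

-- Pre_: keys are distinct (always true of a Python dict rendered as an association list),
-- and no node reachable from `node` lies on a cycle — on cyclic inputs A raises
-- RecursionError (and B raises KeyError), so those inputs are excluded.
def Pre_graph_to_string (graph : List (Int × List Int)) (node : Int) : Prop :=
  (graph.map Prod.fst).Nodup ∧
  ∀ k ∈ insert node (reachF graph (graph.length + 1) node),
    k ∉ reachF graph (graph.length + 1) k

instance (graph : List (Int × List Int)) (node : Int) : Decidable (Pre_graph_to_string graph node) := by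
  unfold Pre_graph_to_string; infer_instance

def pvWitness_graph_to_string : (List (Int × List Int)) × Int := ([(1, [2, 3]), (2, []), (3, [2])], 1)

def Spec_graph_to_string (graph : List (Int × List Int)) (node : Int) (out : String) : Prop :=
  out = graph_to_string_alt graph node
instance (graph : List (Int × List Int)) (node : Int) (out : String) : Decidable (Spec_graph_to_string graph node out) := by
  unfold Spec_graph_to_string; infer_instance

-- ===== CLAIM (what is proved, stated in full; the proofs are below) =====
def Claim_equal_graph_to_string : Prop :=
  ∀ (graph : List (Int × List Int)) (node : Int),
    Dom_graph_to_string graph node → Pre_graph_to_string graph node →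
      Spec_graph_to_string graph node (graph_to_string graph node)

-- ===== LEMMAS AND PROOFS =====

def keysOf (g : List (Int × List Int)) : Finset Int := (g.map Prod.fst).toFinset

-- measure: number of distinct keys strictly reachable from k
def mM (g : List (Int × List Int)) (k : Int) : Nat :=
  (keysOf g ∩ reachF g (g.length + 1) k).card

theorem isKeyB_iff (g : List (Int × List Int)) (c : Int) :
    isKeyB g c = true ↔ c ∈ keysOf g := by
  simp [isKeyB, keysOf, List.any_eq_true, List.mem_map]

theorem kids_nil_of_not_key (g : List (Int × List Int)) (c : Int)
    (h : isKeyB g c = false) : pyDictGetD g c = [] := by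
  unfold pyDictGetD
  have : g.find? (fun p => p.1 == c) = none := by
    rw [List.find?_eq_none]
    intro p hp
    have := List.any_eq_false.mp h p hp
    simpa using this
  rw [this]

theorem kids_eq_snd (g : List (Int × List Int)) (hnd : (g.map Prod.fst).Nodup)
    (p : Int × List Int) (hp : p ∈ g) : pyDictGetD g p.1 = p.2 := by
  induction g with
  | nil => cases hp
  | cons q t ih =>
    simp only [List.map_cons, List.nodup_cons] at hnd
    rcases List.mem_cons.mp hp with h | h
    · subst h
      unfold pyDictGetD
      simp [List.find?_cons_of_pos]
    · have hne : q.1 ≠ p.1 := by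
        intro he
        exact hnd.1 (he ▸ List.mem_map.mpr ⟨p, h, rfl⟩)
      unfold pyDictGetD
      rw [List.find?_cons_of_neg (by simpa using hne)]
      exact ih hnd.2 h

theorem mem_kidsF (g : List (Int × List Int)) (k c : Int) :
    c ∈ kidsF g k ↔ c ∈ pyDictGetD g k := by simp [kidsF]

theorem reachF_succ (g : List (Int × List Int)) (n : Nat) (k : Int) :
    reachF g (n+1) k = reachF g n k ∪ (reachF g n k).biUnion (kidsF g) := rfl

theorem reachF_mono_succ (g : List (Int × List Int)) (n : Nat) (k : Int) :
    reachF g n k ⊆ reachF g (n+1) k := by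
  rw [reachF_succ]; exact Finset.subset_union_left

theorem reachF_mono (g : List (Int × List Int)) {n m : Nat} (h : n ≤ m) (k : Int) :
    reachF g n k ⊆ reachF g m k := by
  induction m with
  | zero => simp_all
  | succ m ih =>
    rcases Nat.lt_or_ge n (m+1) with hlt | hge
    · exact (ih (by omega)).trans (reachF_mono_succ g m k)
    · have : n = m + 1 := by omega
      subst this; exact subset_rfl

theorem mem_reach_succ_of_kid (g : List (Int × List Int)) {n : Nat} {k a b : Int}
    (ha : a ∈ reachF g n k) (hb : b ∈ kidsF g a) : b ∈ reachF g (n+1) k := by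
  rw [reachF_succ]
  exact Finset.mem_union_right _ (Finset.mem_biUnion.mpr ⟨a, ha, hb⟩)

theorem reach_shift (g : List (Int × List Int)) {k c : Int}
    (hc : c ∈ kidsF g k) : ∀ n, ∀ x ∈ reachF g n c, x ∈ reachF g (n+1) k := by
  intro n
  induction n with
  | zero =>
    intro x hx
    exact mem_reach_succ_of_kid g (n := 0) hc hx
  | succ n ih =>
    intro x hx
    rw [reachF_succ] at hx
    rcases Finset.mem_union.mp hx with h | h
    · exact reachF_mono_succ g (n+1) k (ih x h)
    · rcases Finset.mem_biUnion.mp h with ⟨y, hy, hxy⟩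
      exact mem_reach_succ_of_kid g (ih y hy) hxy

theorem reach_fix_propagate (g : List (Int × List Int)) {n : Nat} {k : Int}
    (h : reachF g (n+1) k = reachF g n k) : ∀ j, reachF g (n+j) k = reachF g n k := by
  intro j
  induction j with
  | zero => rfl
  | succ j ih =>
    have : reachF g (n+j+1) k = reachF g (n+j) k ∪ (reachF g (n+j) k).biUnion (kidsF g) :=
      reachF_succ g (n+j) k
    rw [show n + (j+1) = n + j + 1 by omega, this, ih, ← reachF_succ, h]

theorem keys_stable_step (g : List (Int × List Int)) {n : Nat} {k : Int}
    (h : keysOf g ∩ reachF g (n+1) k = keysOf g ∩ reachF g n k) :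
    reachF g (n+2) k = reachF g (n+1) k := by
  rw [reachF_succ g (n+1) k]
  apply Finset.union_eq_left.mpr
  intro x hx
  rcases Finset.mem_biUnion.mp hx with ⟨y, hy, hxy⟩
  by_cases hk : isKeyB g y = true
  · have hyk : y ∈ keysOf g := (isKeyB_iff g y).mp hk
    have : y ∈ keysOf g ∩ reachF g n k := by
      rw [← h]; exact Finset.mem_inter.mpr ⟨hyk, hy⟩
    exact mem_reach_succ_of_kid g (Finset.mem_inter.mp this).2 hxy
  · have : pyDictGetD g y = [] := kids_nil_of_not_key g y (by simpa using hk)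
    rw [mem_kidsF, this] at hxy
    cases hxy

theorem keys_growth (g : List (Int × List Int)) (k : Int) :
    ∀ n, (∀ i < n, keysOf g ∩ reachF g (i+1) k ≠ keysOf g ∩ reachF g i k) →
      n ≤ (keysOf g ∩ reachF g n k).card := by
  intro n
  induction n with
  | zero => intro _; omega
  | succ n ih =>
    intro h
    have h1 : n ≤ (keysOf g ∩ reachF g n k).card := ih (fun i hi => h i (by omega))
    have hsub : keysOf g ∩ reachF g n k ⊆ keysOf g ∩ reachF g (n+1) k :=
      Finset.inter_subset_inter subset_rfl (reachF_mono_succ g n k)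
    have hne := h n (by omega)
    have : keysOf g ∩ reachF g n k ⊂ keysOf g ∩ reachF g (n+1) k :=
      ⟨hsub, fun hrev => hne (le_antisymm hrev hsub)⟩
    have := Finset.card_lt_card this
    omega

theorem reach_sat (g : List (Int × List Int)) (k : Int) :
    reachF g (g.length + 2) k = reachF g (g.length + 1) k := by
  have hex : ∃ n ≤ g.length, keysOf g ∩ reachF g (n+1) k = keysOf g ∩ reachF g n k := by
    by_contra hc
    push Not at hc
    have h := keys_growth g k (g.length + 1) (fun i hi => hc i (by omega))
    have h2 : (keysOf g ∩ reachF g (g.length+1) k).card ≤ (keysOf g).card :=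
      Finset.card_le_card Finset.inter_subset_left
    have h3 : (keysOf g).card ≤ g.length := by
      have := List.toFinset_card_le (g.map Prod.fst)
      simpa [keysOf] using this
    omega
  rcases hex with ⟨n, hn, heq⟩
  have hfix : reachF g (n+2) k = reachF g (n+1) k := keys_stable_step g heq
  have hprop := reach_fix_propagate g hfix
  have e1 := hprop (g.length + 1 - n)
  have e2 := hprop (g.length - n)
  rw [show n + 1 + (g.length + 1 - n) = g.length + 2 by omega] at e1
  rw [show n + 1 + (g.length - n) = g.length + 1 by omega] at e2
  rw [e1, e2]

theorem child_reach_subset (g : List (Int × List Int)) {k c : Int}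
    (hc : c ∈ kidsF g k) :
    reachF g (g.length + 1) c ⊆ reachF g (g.length + 1) k := by
  intro x hx
  have := reach_shift g hc (g.length + 1) x hx
  rwa [reach_sat g k] at this

theorem child_mem_reach (g : List (Int × List Int)) {k c : Int}
    (hc : c ∈ kidsF g k) : c ∈ reachF g (g.length + 1) k :=
  reachF_mono g (Nat.zero_le _) k hc

theorem region_closed (g : List (Int × List Int)) {node k c : Int}
    (hk : k ∈ insert node (reachF g (g.length + 1) node))
    (hc : c ∈ kidsF g k) : c ∈ reachF g (g.length + 1) node := by
  rcases Finset.mem_insert.mp hk with h | h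
  · subst h; exact child_mem_reach g hc
  · have := mem_reach_succ_of_kid g h hc
    rwa [reach_sat g node] at this

theorem measure_lt (g : List (Int × List Int)) {node k c : Int}
    (hpre : Pre_graph_to_string g node)
    (hk : k ∈ insert node (reachF g (g.length + 1) node))
    (hc : c ∈ kidsF g k) (hkey : c ∈ keysOf g) : mM g c < mM g k := by
  have hcr : c ∈ reachF g (g.length + 1) node := region_closed g hk hc
  have hacyc : c ∉ reachF g (g.length + 1) c :=
    hpre.2 c (Finset.mem_insert_of_mem hcr)
  apply Finset.card_lt_card
  constructor
  · exact Finset.inter_subset_inter subset_rfl (child_reach_subset g hc)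
  · intro hsub
    exact hacyc (Finset.mem_inter.mp
      (hsub (Finset.mem_inter.mpr ⟨hkey, child_mem_reach g hc⟩))).2

theorem gtsA_nonkey (g : List (Int × List Int)) (c : Int) (f : Nat)
    (h : pyDictGetD g c = []) : gtsA g (f+1) c = "0" := by
  simp [gtsA, h]

theorem gtsA_loop_eq_map (g : List (Int × List Int)) (f : Nat) (cs : List Int) :
    cs.foldl (fun s c => s ++ [gtsA g f c]) [] = cs.map (gtsA g f) := by
  simpa using PySem.List.foldl_append_singleton_eq_map (gtsA g f) cs ([] : List String)

-- ----- B-side invariants -----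

def Presv (d d' : PySem.Dict Int String) : Prop :=
  ∀ k v, d.get? k = some v → d'.get? k = some v

theorem presv_contains {d d' : PySem.Dict Int String} (h : Presv d d')
    {k : Int} (hk : d.contains k = true) : d'.contains k = true := by
  rw [PySem.Dict.contains_eq_isSome_get?] at hk ⊢
  rcases Option.isSome_iff_exists.mp hk with ⟨v, hv⟩
  rw [h k v hv]; rfl

theorem stepB_presv (g : List (Int × List Int)) (s : PySem.Dict Int String × Bool)
    (p : Int × List Int) : Presv s.1 (stepB g s p).1 := by
  intro k v hv
  unfold stepB
  split_ifs with h1 h2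
  · exact hv
  · have hne : k ≠ p.1 := by
      intro he; subst he
      rw [PySem.Dict.contains_eq_isSome_get?, hv] at h1
      simp at h1
    rw [PySem.Dict.get?_insert_of_ne _ _ hne]
    exact hv
  · exact hv

theorem foldl_stepB_presv (g : List (Int × List Int)) :
    ∀ (l : List (Int × List Int)) (s : PySem.Dict Int String × Bool),
      Presv s.1 ((l.foldl (stepB g) s).1) := by
  intro l
  induction l with
  | nil => intro s k v hv; exact hv
  | cons q t ih =>
    intro s k v hv
    exact ih (stepB g s q) k v (stepB_presv g s q k v hv)

-- consistency of the memo dict: every resolved key is a graph key, its key-children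
-- are resolved, and its value is the encoding computed from the current dict
def ConsB (g : List (Int × List Int)) (d : PySem.Dict Int String) : Prop :=
  ∀ k v, d.get? k = some v →
    isKeyB g k = true ∧
    (∀ c ∈ pyDictGetD g k, isKeyB g c = true → d.contains c = true) ∧
    v = encValB d (pyDictGetD g k)

theorem encValB_congr {d d' : PySem.Dict Int String} {cs : List Int}
    (h : ∀ c ∈ cs, d.getD c "0" = d'.getD c "0") : encValB d cs = encValB d' cs := by
  unfold encValB
  split_ifs with hnil
  · rfl
  · rw [List.map_congr_left h]

theorem stepB_cons (g : List (Int × List Int)) (hnd : (g.map Prod.fst).Nodup)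
    (s : PySem.Dict Int String × Bool) (p : Int × List Int) (hp : p ∈ g)
    (hcons : ConsB g s.1) : ConsB g (stepB g s p).1 := by
  unfold stepB
  split_ifs with h1 h2
  · exact hcons
  · -- insert branch
    have hkeyp : isKeyB g p.1 = true :=
      List.any_eq_true.mpr ⟨p, hp, by simp⟩
    have hall : ∀ c ∈ p.2, s.1.contains c = true ∨ isKeyB g c = false := by
      intro c hc
      have := List.all_eq_true.mp h2 c hc
      rcases Bool.or_eq_true_iff.mp this with h | h
      · exact Or.inl h
      · exact Or.inr (by simpa using h)
    have hne_kid : ∀ c ∈ p.2, c ≠ p.1 := by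
      intro c hc he
      rcases hall c hc with h | h
      · rw [he] at h; exact h1 h
      · rw [he] at h; simp [h] at hkeyp
    have hkids : pyDictGetD g p.1 = p.2 := kids_eq_snd g hnd p hp
    intro k v hv
    by_cases hk : k = p.1
    · subst hk
      rw [PySem.Dict.get?_insert_self] at hv
      injection hv with hv
      refine ⟨hkeyp, ?_, ?_⟩
      · intro c hc hkey
        rw [hkids] at hc
        rcases hall c hc with h | h
        · rw [PySem.Dict.contains_insert]
          simp [h]
        · rw [h] at hkey; cases hkey
      · rw [hkids, ← hv]
        apply encValB_congr
        intro c hc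
        rw [PySem.Dict.getD_insert]
        simp [hne_kid c hc]
    · rw [PySem.Dict.get?_insert_of_ne _ _ hk] at hv
      obtain ⟨hik, hic, hiv⟩ := hcons k v hv
      refine ⟨hik, ?_, ?_⟩
      · intro c hc hkey
        rw [PySem.Dict.contains_insert]
        simp [hic c hc hkey]
      · rw [hiv]
        apply encValB_congr
        intro c hc
        have hcne : c ≠ p.1 := by
          intro he
          have := hic c hc (he ▸ hkeyp)
          rw [he] at this
          exact h1 this
        rw [PySem.Dict.getD_insert]
        simp [hcne]
  · exact hcons

theorem foldl_stepB_cons (g : List (Int × List Int)) (hnd : (g.map Prod.fst).Nodup) :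
    ∀ (l : List (Int × List Int)), (∀ p ∈ l, p ∈ g) →
      ∀ (s : PySem.Dict Int String × Bool), ConsB g s.1 →
        ConsB g ((l.foldl (stepB g) s).1) := by
  intro l
  induction l with
  | nil => intro _ s hs; exact hs
  | cons q t ih =>
    intro hl s hs
    exact ih (fun p hp => hl p (List.mem_cons_of_mem q hp)) (stepB g s q)
      (stepB_cons g hnd s q (hl q List.mem_cons_self) hs)

-- a round whose progressed flag stayed false changed nothing, and every key it
-- scanned was either already resolved or had an unresolved key-child
theorem fold_no_progress (g : List (Int × List Int)) :
    ∀ (l : List (Int × List Int)) (s : PySem.Dict Int String × Bool),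
      (l.foldl (stepB g) s).2 = false →
      (l.foldl (stepB g) s) = s ∧
      ∀ p ∈ l, s.1.contains p.1 = true ∨
        p.2.all (fun c => s.1.contains c || !isKeyB g c) = false := by
  intro l
  induction l with
  | nil => intro s _; exact ⟨rfl, by intro p hp; cases hp⟩
  | cons q t ih =>
    intro s hflag
    rw [List.foldl_cons] at hflag ⊢
    obtain ⟨heq, hprops⟩ := ih (stepB g s q) hflag
    have hs2 : (stepB g s q).2 = false := by rw [heq] at hflag; exact hflag
    have hins : ¬ s.1.contains q.1 = true →
        q.2.all (fun c => s.1.contains c || !isKeyB g c) = true → False := by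
      intro h1 h2
      have : stepB g s q = (s.1.insert q.1 (encValB s.1 q.2), true) := by
        unfold stepB; rw [if_neg h1, if_pos h2]
      rw [this] at hs2
      simp at hs2
    have hstep : stepB g s q = s := by
      by_cases h1 : s.1.contains q.1 = true
      · unfold stepB; rw [if_pos h1]
      · by_cases h2 : q.2.all (fun c => s.1.contains c || !isKeyB g c) = true
        · exact absurd (hins h1 h2) (by simp)
        · unfold stepB; rw [if_neg h1, if_neg h2]
    rw [hstep] at heq hprops ⊢
    refine ⟨heq, ?_⟩
    intro p hp
    rcases List.mem_cons.mp hp with he | ht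
    · subst he
      by_cases h1 : s.1.contains p.1 = true
      · exact Or.inl h1
      · right
        by_cases h2 : p.2.all (fun c => s.1.contains c || !isKeyB g c) = true
        · exact absurd (hins h1 h2) (by simp)
        · simpa using h2
    · exact hprops p ht

-- the r-round memo dict (with the break flag in the second component)
def encN (g : List (Int × List Int)) : Nat → PySem.Dict Int String × Bool
  | 0 => (PySem.Dict.empty, false)
  | r+1 => outerB g (encN g r)

theorem encN_eq_foldl (g : List (Int × List Int)) :
    ∀ r, (List.range r).foldl (fun s _ => outerB g s) (PySem.Dict.empty, false)
      = encN g r := by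
  intro r
  induction r with
  | zero => rfl
  | succ r ih =>
    rw [List.range_succ, List.foldl_append, ih]
    rfl

theorem encN_cons (g : List (Int × List Int)) (hnd : (g.map Prod.fst).Nodup) :
    ∀ r, ConsB g (encN g r).1 := by
  intro r
  induction r with
  | zero =>
    intro k v hv
    simp [encN, PySem.Dict.get?_empty] at hv
  | succ r ih =>
    show ConsB g (outerB g (encN g r)).1
    unfold outerB
    split_ifs with h
    · exact ih
    · exact foldl_stepB_cons g hnd g (fun p hp => hp) ((encN g r).1, false) ih

theorem fold_hits (g : List (Int × List Int)) (d0 : PySem.Dict Int String) :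
    ∀ (l : List (Int × List Int)) (s : PySem.Dict Int String × Bool), Presv d0 s.1 →
      ∀ p ∈ l, (∀ c ∈ p.2, isKeyB g c = true → d0.contains c = true) →
        ((l.foldl (stepB g) s).1).contains p.1 = true := by
  intro l
  induction l with
  | nil => intro s _ p hp; cases hp
  | cons q t ih =>
    intro s hpres p hp hkids
    rcases List.mem_cons.mp hp with he | ht
    · subst he
      have hcontain : ((stepB g s p).1).contains p.1 = true := by
        unfold stepB
        split_ifs with h1 h2
        · exact h1
        · exact PySem.Dict.contains_insert_self _ _ _
        · exfalso
          apply h2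
          rw [List.all_eq_true]
          intro c hc
          by_cases hkey : isKeyB g c = true
          · have := presv_contains hpres (hkids c hc hkey)
            simp [this]
          · simp [Bool.not_eq_true] at hkey
            simp [hkey]
      exact presv_contains (foldl_stepB_presv g t (stepB g s p)) hcontain
    · exact ih (stepB g s q)
        (fun k v hv => stepB_presv g s q k v (hpres k v hv)) p ht hkids

-- once a round stalls, every key of the acyclic region is already resolved
theorem stalled_complete (g : List (Int × List Int)) (node : Int)
    (hpre : Pre_graph_to_string g node) (d : PySem.Dict Int String)
    (hstall : ∀ p ∈ g, d.contains p.1 = true ∨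
      p.2.all (fun c => d.contains c || !isKeyB g c) = false) :
    ∀ B p, p ∈ g → p.1 ∈ insert node (reachF g (g.length + 1) node) →
      mM g p.1 < B → d.contains p.1 = true := by
  intro B
  induction B with
  | zero => intro p _ _ h; omega
  | succ B ih =>
    intro p hp hreg hm
    have hguard : p.2.all (fun c => d.contains c || !isKeyB g c) = true := by
      rw [List.all_eq_true]
      intro c hc
      by_cases hkey : isKeyB g c = true
      · have hck : c ∈ kidsF g p.1 := by
          rw [mem_kidsF, kids_eq_snd g hpre.1 p hp]; exact hc
        have hregc : c ∈ insert node (reachF g (g.length + 1) node) :=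
          Finset.mem_insert_of_mem (region_closed g hreg hck)
        have hlt : mM g c < mM g p.1 :=
          measure_lt g hpre hreg hck ((isKeyB_iff g c).mp hkey)
        rcases List.any_eq_true.mp hkey with ⟨q, hq, hqc⟩
        have hqc' : q.1 = c := by simpa using hqc
        have := ih q hq (hqc' ▸ hregc) (by rw [hqc']; omega)
        rw [hqc'] at this
        simp [this]
      · simp [Bool.not_eq_true] at hkey
        simp [hkey]
    rcases hstall p hp with h | h
    · exact h
    · rw [hguard] at h; cases h

-- after r rounds every region key of measure < r is resolved; if the loop has
-- broken out, the whole region is resolved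
theorem encN_complete (g : List (Int × List Int)) (node : Int)
    (hpre : Pre_graph_to_string g node) :
    ∀ r,
      ((encN g r).2 = true → ∀ p ∈ g,
          p.1 ∈ insert node (reachF g (g.length + 1) node) →
          ((encN g r).1).contains p.1 = true) ∧
      (∀ p ∈ g, p.1 ∈ insert node (reachF g (g.length + 1) node) →
          mM g p.1 < r → ((encN g r).1).contains p.1 = true) := by
  intro r
  induction r with
  | zero =>
    constructor
    · intro h; cases h
    · intro p _ _ h; omega
  | succ r ih =>
    have hout : encN g (r+1) = outerB g (encN g r) := rfl
    by_cases hstop : (encN g r).2 = true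
    · -- already broken out: state unchanged, full completeness carries over
      have he : encN g (r+1) = encN g r := by
        rw [hout]; unfold outerB; rw [if_pos hstop]
      rw [he]
      exact ⟨fun _ => ih.1 hstop, fun p hp hreg _ => ih.1 hstop p hp hreg⟩
    · have he : encN g (r+1)
          = ((roundB g (encN g r).1).1, !(roundB g (encN g r).1).2) := by
        rw [hout]; unfold outerB; rw [if_neg hstop]
      rw [he]
      constructor
      · -- the break flag was just set ⇔ this round made no progress
        intro hflag p hp hreg
        simp only [Bool.not_eq_true'] at hflag
        obtain ⟨heq, hprops⟩ := fold_no_progress g g ((encN g r).1, false) hflag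
        show ((roundB g (encN g r).1).1).contains p.1 = true
        rw [show roundB g (encN g r).1 = g.foldl (stepB g) ((encN g r).1, false) from rfl,
          heq]
        exact stalled_complete g node hpre (encN g r).1 hprops
          (mM g p.1 + 1) p hp hreg (by omega)
      · intro p hp hreg hm
        show ((g.foldl (stepB g) ((encN g r).1, false)).1).contains p.1 = true
        apply fold_hits g (encN g r).1 g ((encN g r).1, false) (fun k v hv => hv) p hp
        intro c hc hkey
        have hck : c ∈ kidsF g p.1 := by
          rw [mem_kidsF, kids_eq_snd g hpre.1 p hp]; exact hc
        have hregc : c ∈ insert node (reachF g (g.length + 1) node) :=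
          Finset.mem_insert_of_mem (region_closed g hreg hck)
        have hlt : mM g c < mM g p.1 :=
          measure_lt g hpre hreg hck ((isKeyB_iff g c).mp hkey)
        rcases List.any_eq_true.mp hkey with ⟨q, hq, hqc⟩
        have hqc' : q.1 = c := by simpa using hqc
        have := ih.2 q hq (hqc' ▸ hregc) (by rw [hqc']; omega)
        rwa [hqc'] at this

theorem retrieve (g : List (Int × List Int)) (node : Int)
    (hpre : Pre_graph_to_string g node) (d : PySem.Dict Int String)
    (hcons : ConsB g d) :
    ∀ B k f, k ∈ insert node (reachF g (g.length + 1) node) →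
      mM g k < B → mM g k + 1 < f → d.contains k = true →
      d.get? k = some (gtsA g f k) := by
  intro B
  induction B with
  | zero => intro k f _ h; omega
  | succ B ih =>
    intro k f hreg hB hf hcont
    rw [PySem.Dict.contains_eq_isSome_get?] at hcont
    rcases Option.isSome_iff_exists.mp hcont with ⟨v, hv⟩
    obtain ⟨hik, hic, hiv⟩ := hcons k v hv
    obtain ⟨a, rfl⟩ : ∃ a, f = a + 1 := ⟨f - 1, by omega⟩
    rw [hv]
    congr 1
    rw [hiv]
    simp only [gtsA, gtsA_loop_eq_map, encValB]
    by_cases hnil : (pyDictGetD g k).isEmpty = true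
    · have hlen : (pyDictGetD g k).length = 0 := by
        simpa [List.isEmpty_iff, List.length_eq_zero_iff] using hnil
      simp [hnil, hlen]
    · have hmap : (pyDictGetD g k).map (fun c => d.getD c "0")
          = (pyDictGetD g k).map (gtsA g a) := by
        apply List.map_congr_left
        intro c hc
        have hck : c ∈ kidsF g k := (mem_kidsF g k c).mpr hc
        by_cases hkey : isKeyB g c = true
        · have hregc : c ∈ insert node (reachF g (g.length + 1) node) :=
            Finset.mem_insert_of_mem (region_closed g hreg hck)
          have hlt : mM g c < mM g k :=
            measure_lt g hpre hreg hck ((isKeyB_iff g c).mp hkey)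
          have := ih c a hregc (by omega) (by omega) (hic c hc hkey)
          rw [PySem.Dict.getD_eq_get?_getD, this]
          rfl
        · have hnone : d.get? c = none := by
            cases hg : d.get? c with
            | none => rfl
            | some w =>
              have := (hcons c w hg).1
              rw [this] at hkey
              exact absurd rfl hkey
          rw [PySem.Dict.getD_eq_get?_getD, hnone]
          have hnilc : pyDictGetD g c = [] :=
            kids_nil_of_not_key g c (by simpa using hkey)
          obtain ⟨a', rfl⟩ : ∃ a', a = a' + 1 := ⟨a - 1, by omega⟩
          rw [gtsA_nonkey g c a' hnilc]
          rfl
      have hlen : ¬ (pyDictGetD g k).length = 0 := by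
        simp [List.isEmpty_iff, List.length_eq_zero_iff] at hnil ⊢
        exact hnil
      simp only [Bool.not_eq_true] at hnil
      simp only [hnil, hlen, if_false, Bool.false_eq_true, hmap]

-- ===== VERDICT (by name: the statement is the Claim_ definition above) =====
theorem graph_to_string_spec : Claim_equal_graph_to_string := by
  unfold Claim_equal_graph_to_string
  intro g node _ hpre
  unfold Spec_graph_to_string graph_to_string graph_to_string_alt
  rw [encN_eq_foldl g g.length]
  by_cases hkey : isKeyB g node = true
  · simp only [hkey, if_true]
    have hnodekey : node ∈ keysOf g := (isKeyB_iff g node).mp hkey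
    have hacyc : node ∉ reachF g (g.length + 1) node :=
      hpre.2 node (Finset.mem_insert_self _ _)
    have hcard : (keysOf g).card = g.length := by
      rw [keysOf, List.toFinset_card_of_nodup hpre.1, List.length_map]
    have hm : mM g node < g.length := by
      have hsub : keysOf g ∩ reachF g (g.length + 1) node ⊆ (keysOf g).erase node := by
        intro x hx
        rcases Finset.mem_inter.mp hx with ⟨h1, h2⟩
        refine Finset.mem_erase.mpr ⟨?_, h1⟩
        intro he; subst he; exact hacyc h2
      have h1 : mM g node ≤ ((keysOf g).erase node).card := Finset.card_le_card hsub
      have h2 : ((keysOf g).erase node).card = (keysOf g).card - 1 :=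
        Finset.card_erase_of_mem hnodekey
      have h3 : 1 ≤ (keysOf g).card := Finset.card_pos.mpr ⟨node, hnodekey⟩
      omega
    rcases List.any_eq_true.mp hkey with ⟨p, hp, hpc⟩
    have hpc' : p.1 = node := by simpa using hpc
    have hcont : ((encN g g.length).1).contains node = true := by
      by_cases hstop : (encN g g.length).2 = true
      · have := (encN_complete g node hpre g.length).1 hstop p hp
          (by rw [hpc']; exact Finset.mem_insert_self _ _)
        rwa [hpc'] at this
      · have := (encN_complete g node hpre g.length).2 p hp
          (by rw [hpc']; exact Finset.mem_insert_self _ _) (by rw [hpc']; omega)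
        rwa [hpc'] at this
    have := retrieve g node hpre ((encN g g.length).1) (encN_cons g hpre.1 g.length)
      (mM g node + 1) node (g.length + 1) (Finset.mem_insert_self _ _)
      (by omega) (by omega) hcont
    rw [this]
    rfl
  · simp only [hkey]
    have hnil : pyDictGetD g node = [] :=
      kids_nil_of_not_key g node (by simpa using hkey)
    exact gtsA_nonkey g node g.length hnil
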